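-- pv_equiv track=rewrite | github.com/christopherLang/baruch_college_sta9794_projects | lib/utils.py | size_sequencer
-- ===== SOURCE A (Python) =====
-- import math
--
-- def size_sequencer(size, n_groups, start_index=0):
--     assert n_groups > 0
--
--     result = list()
--
--     if n_groups >= 2:
--         if size % n_groups == 0:
--             subsize = int(size / n_groups)
--             left_over = 0
--
--         else:
--             subsize = int(math.floor(size / n_groups))
--             left_over = int(size - subsize * n_groups)
--
--         i = start_index
--         for _ in range(n_groups):
--             r = (i, i + subsize - 1)
--
--             result.append(r)
--
--             i += subsize
--
--         if left_over is not 0: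
--             result[-1] = (result[-1][0], result[-1][1] + left_over)
--
--     else:
--         # n_groups is == 1
--         result.append((start_index, start_index + size - 1))
--
--     return result
-- ===== SOURCE B (Python) =====
-- import math
--
-- def size_sequencer(size, n_groups, start_index=0):
--     assert n_groups > 0
--     subsize = int(math.floor(size / n_groups))
--     bounds = [start_index + k * subsize for k in range(n_groups)] + [start_index + size]
--     return [(lo, hi - 1) for lo, hi in zip(bounds, bounds[1:])]
-- ===== Notes on version B (the rewrite author's own statement) =====
-- stated objective: simpler
-- what changed: Replaces A's three-way special-casing (divisible size, remainder patch of the last element, separate n_groups==1 branch) and running-index accumulation loop by computing a boundary table once and pairing adjacent boundaries, letting the final boundary start_index+size absorb the leftover automatically.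
import Mathlib
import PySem

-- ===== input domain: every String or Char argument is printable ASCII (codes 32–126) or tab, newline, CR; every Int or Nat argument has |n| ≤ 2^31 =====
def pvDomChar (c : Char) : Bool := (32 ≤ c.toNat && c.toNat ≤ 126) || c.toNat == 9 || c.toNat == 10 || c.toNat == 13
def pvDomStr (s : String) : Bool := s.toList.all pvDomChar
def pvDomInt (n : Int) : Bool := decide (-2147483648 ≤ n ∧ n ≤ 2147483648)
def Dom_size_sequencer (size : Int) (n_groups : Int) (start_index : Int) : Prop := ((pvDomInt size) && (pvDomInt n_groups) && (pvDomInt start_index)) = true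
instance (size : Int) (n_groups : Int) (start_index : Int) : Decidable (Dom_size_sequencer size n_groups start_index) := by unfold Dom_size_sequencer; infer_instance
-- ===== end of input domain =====

-- B replaces A's special-cased loop (divisibility / n_groups==1 branches + last-element patch)
-- by a boundary table paired adjacently; objective: simpler, same cost.


-- ===== PORT A =====
-- Python's int(size/n_groups) (taken only when n_groups divides size) and
-- int(math.floor(size/n_groups)) both equal floor division exactly for |size| ≤ 2^31:
-- the float quotient's rounding error is below half the distance (≥ 1/n_groups) from a
-- non-integer quotient to the nearest integer at these magnitudes.  `result[-1] = ...` is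
-- ported via getLast?/dropLast; result is nonempty there (n_groups ≥ 2), so the getD
-- default is unreachable.  `left_over is not 0` on these ints is exactly `left_over ≠ 0`.
def size_sequencer (size : Int) (n_groups : Int) (start_index : Int) : List (Int × Int) :=
  if n_groups ≥ 2 then
    let p : Int × Int :=
      if PySem.Int.mod size n_groups = 0 then
        (PySem.Int.floordiv size n_groups, 0)
      else
        let subsize := PySem.Int.floordiv size n_groups
        (subsize, size - subsize * n_groups)
    let subsize := p.1
    let left_over := p.2
    let st := (PySem.List.pyRange 0 n_groups 1).foldl
      (fun (st : List (Int × Int) × Int) _ =>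
        (st.1 ++ [(st.2, st.2 + subsize - 1)], st.2 + subsize))
      ([], start_index)
    let result := st.1
    if left_over ≠ 0 then
      result.dropLast ++ [(((result.getLast?).getD (0, 0)).1, ((result.getLast?).getD (0, 0)).2 + left_over)]
    else
      result
  else
    [(start_index, start_index + size - 1)]

-- ===== PORT B =====
-- helper for Source B's `[(lo, hi - 1) for lo, hi in zip(bounds, bounds[1:])]`
-- (bounds[1:] on a list is List.drop 1)
def pvAdjPairs (xs : List Int) : List (Int × Int) :=
  (xs.zip (xs.drop 1)).map (fun p => (p.1, p.2 - 1))

def size_sequencer_alt (size : Int) (n_groups : Int) (start_index : Int) : List (Int × Int) :=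
  let subsize := PySem.Int.floordiv size n_groups
  let bounds := (PySem.List.pyRange 0 n_groups 1).map (fun k => start_index + k * subsize)
                  ++ [start_index + size]
  pvAdjPairs bounds

-- ===== PRECONDITION & SPEC =====
-- A's `assert n_groups > 0` raises AssertionError otherwise; exactly those inputs are excluded.
def Pre_size_sequencer (size : Int) (n_groups : Int) (start_index : Int) : Prop := 0 < n_groups
instance (size : Int) (n_groups : Int) (start_index : Int) : Decidable (Pre_size_sequencer size n_groups start_index) := by unfold Pre_size_sequencer; infer_instance

def pvWitness_size_sequencer : Int × Int × Int := (7, 3, 0)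

def Spec_size_sequencer (size : Int) (n_groups : Int) (start_index : Int) (out : List (Int × Int)) : Prop := out = size_sequencer_alt size n_groups start_index
instance (size : Int) (n_groups : Int) (start_index : Int) (out : List (Int × Int)) : Decidable (Spec_size_sequencer size n_groups start_index out) := by unfold Spec_size_sequencer; infer_instance

-- ===== CLAIM (what is proved, stated in full; the proofs are below) =====
def Claim_equal_size_sequencer : Prop := ∀ (size : Int) (n_groups : Int) (start_index : Int), Dom_size_sequencer size n_groups start_index → Pre_size_sequencer size n_groups start_index → Spec_size_sequencer size n_groups start_index (size_sequencer size n_groups start_index)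

-- ===== LEMMAS AND PROOFS =====

-- shifting the chunk index: range (L+1) chunks from i = first chunk + range L chunks from i+ss
lemma map_range_shift (ss i : Int) (L : Nat) :
    (List.range (L + 1)).map (fun k : Nat => ((i + k * ss, i + k * ss + ss - 1) : Int × Int))
      = (i, i + ss - 1)
        :: (List.range L).map (fun k : Nat => ((i + ss) + k * ss, (i + ss) + k * ss + ss - 1)) := by
  rw [List.range_succ_eq_map, List.map_cons, List.map_map]
  refine congrArg₂ _ (by norm_num) ?_
  refine List.map_congr_left (fun k _ => ?_)
  simp only [Function.comp, Nat.succ_eq_add_one, Prod.mk.injEq]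
  push_cast
  constructor <;> ring

-- A's loop: appending `l.length`-many chunks of width ss starting at i.
lemma foldl_chunks (ss : Int) :
    ∀ (l : List Int) (acc : List (Int × Int)) (i : Int),
      l.foldl (fun (st : List (Int × Int) × Int) _ =>
          (st.1 ++ [(st.2, st.2 + ss - 1)], st.2 + ss)) (acc, i)
        = (acc ++ (List.range l.length).map
              (fun k : Nat => (i + k * ss, i + k * ss + ss - 1)),
           i + l.length * ss)
  | [], acc, i => by simp
  | _ :: l, acc, i => by
      rw [List.foldl_cons, foldl_chunks ss l]
      refine Prod.ext ?_ ?_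
      · simp only [List.length_cons, map_range_shift]
        simp
      · simp only [List.length_cons]
        push_cast
        ring

lemma adj_cons_cons (x y : Int) (l : List Int) :
    pvAdjPairs (x :: y :: l) = (x, y - 1) :: pvAdjPairs (y :: l) := by
  simp [pvAdjPairs]

lemma adj_append_two (a e : Int) :
    ∀ ys : List Int, pvAdjPairs (ys ++ [a, e]) = pvAdjPairs (ys ++ [a]) ++ [(a, e - 1)]
  | [] => by simp [pvAdjPairs]
  | [x] => by simp [pvAdjPairs]
  | x :: y :: ys => by
      have h := adj_append_two a e (y :: ys)
      simp only [List.cons_append] at h ⊢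
      rw [adj_cons_cons, adj_cons_cons, h]
      simp

lemma adj_map_range :
    ∀ (j : Nat) (f : Nat → Int),
      pvAdjPairs ((List.range (j + 1)).map f)
        = (List.range j).map (fun k => (f k, f (k + 1) - 1))
  | 0, f => by simp [pvAdjPairs]
  | j + 1, f => by
      have e1 : (List.range (j + 2)).map f
          = (List.range j).map f ++ [f j, f (j + 1)] := by
        rw [List.range_succ, List.range_succ]
        simp
      rw [e1, adj_append_two]
      have e2 : (List.range j).map f ++ [f j] = (List.range (j + 1)).map f := by
        rw [List.range_succ]; simp
      rw [e2, adj_map_range j f, List.range_succ]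
      simp

lemma pyRange_range (n_groups : Int) (j : Nat) (hm : ((j : Int) + 1) = n_groups) :
    PySem.List.pyRange 0 n_groups 1 = (List.range (j + 1)).map (fun k : Nat => (k : Int)) := by
  have h := PySem.List.pyRange_zero_natCast (j + 1)
  rw [Nat.cast_add, Nat.cast_one, hm] at h
  exact h

-- B's closed form, for n_groups = j + 1 groups.
lemma alt_closed (size n_groups start_index : Int) (j : Nat)
    (hm : ((j : Int) + 1) = n_groups) :
    size_sequencer_alt size n_groups start_index
      = (List.range j).map (fun k : Nat =>
            (start_index + k * PySem.Int.floordiv size n_groups,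
             start_index + k * PySem.Int.floordiv size n_groups
               + PySem.Int.floordiv size n_groups - 1))
        ++ [(start_index + j * PySem.Int.floordiv size n_groups, start_index + size - 1)] := by
  simp only [size_sequencer_alt]
  set ss := PySem.Int.floordiv size n_groups with hss
  rw [pyRange_range n_groups j hm, List.map_map]
  have e1 : (List.range (j + 1)).map
        ((fun k : Int => start_index + k * ss) ∘ (fun k : Nat => (k : Int)))
        ++ [start_index + size]
      = (List.range j).map (fun k : Nat => start_index + k * ss)
        ++ [start_index + (j : Int) * ss, start_index + size] := by
    rw [List.range_succ]
    simp [Function.comp]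
  rw [e1, adj_append_two]
  have e2 : (List.range j).map (fun k : Nat => start_index + k * ss)
        ++ [start_index + (j : Int) * ss]
      = (List.range (j + 1)).map (fun k : Nat => start_index + k * ss) := by
    rw [List.range_succ]; simp
  rw [e2, adj_map_range]
  refine congrArg₂ _ (List.map_congr_left (fun k _ => ?_)) rfl
  simp only [Prod.mk.injEq]
  push_cast
  exact ⟨trivial, by ring⟩

-- ===== VERDICT (by name: the statement is the Claim_ definition above) =====
theorem size_sequencer_spec : Claim_equal_size_sequencer := by
  intro size n_groups start_index _hdom hpre
  unfold Spec_size_sequencer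
  have hn : (0 : Int) < n_groups := hpre
  obtain ⟨j, hm⟩ : ∃ j : Nat, ((j : Int) + 1) = n_groups := by
    refine ⟨(n_groups - 1).toNat, ?_⟩
    have := Int.toNat_of_nonneg (a := n_groups - 1) (by omega)
    omega
  have hdm := PySem.Int.floordiv_mul_add_mod size n_groups
  rw [alt_closed size n_groups start_index j hm]
  have hlen : (PySem.List.pyRange 0 n_groups 1).length = j + 1 := by
    rw [pyRange_range n_groups j hm]; simp
  by_cases h2 : n_groups ≥ 2
  · simp only [size_sequencer, if_pos h2]
    by_cases hmod : PySem.Int.mod size n_groups = 0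
    · -- exact division: left_over = 0, no patch
      rw [if_pos hmod]
      rw [foldl_chunks, hlen]
      simp only [List.nil_append, ne_eq, not_true_eq_false, if_false]
      rw [List.range_succ, List.map_append]
      simp only [List.map_cons, List.map_nil]
      refine congrArg₂ _ rfl ?_
      rw [hmod, add_zero] at hdm
      have : start_index + (j : Int) * PySem.Int.floordiv size n_groups
            + PySem.Int.floordiv size n_groups - 1 = start_index + size - 1 := by
        linear_combination hdm + PySem.Int.floordiv size n_groups * hm
      rw [this]
    · -- remainder: left_over = size - subsize * n_groups ≠ 0, last pair patched
      rw [if_neg hmod]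
      rw [foldl_chunks, hlen]
      simp only [List.nil_append, ne_eq]
      have hlo : size - PySem.Int.floordiv size n_groups * n_groups ≠ 0 := by
        intro h
        exact hmod (by linarith [hdm])
      rw [if_pos hlo]
      rw [List.range_succ, List.map_append]
      simp only [List.map_cons, List.map_nil]
      rw [List.dropLast_concat, List.getLast?_concat]
      simp only [Option.getD_some]
      refine congrArg₂ _ rfl ?_
      have : start_index + (j : Int) * PySem.Int.floordiv size n_groups
            + PySem.Int.floordiv size n_groups - 1
            + (size - PySem.Int.floordiv size n_groups * n_groups)
          = start_index + size - 1 := by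
        linear_combination PySem.Int.floordiv size n_groups * hm
      rw [this]
  · -- n_groups = 1, so j = 0
    have hj : j = 0 := by omega
    subst hj
    simp only [size_sequencer, if_neg h2]
    simp
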